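-- pv_equiv track=rewrite | github.com/baekyutae/Study | 코딩테스트/구현/럭키 스트레이트(lucky)/test_lucky.py | skill_check
-- ===== SOURCE A (Python) =====
-- def skill_check(number):
--     point = []
--     for i in str(number):
--         point.append(i)
--
--     mid = len(point)//2
--
--     left_sum = sum(int(i) for i in point[:mid])
--     right_sum = sum(int(i) for i in point[mid:])
--
--     if left_sum == right_sum:
--         return("lucky")
--     else:
--         return("ready")
-- ===== SOURCE B (Python) =====
-- def skill_check(number):
--     s = str(number)
--     mid = len(s) // 2
--     bal = 0
--     for idx, ch in enumerate(s):
--         d = int(ch)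
--         bal = bal + d if idx < mid else bal - d
--     return "lucky" if bal == 0 else "ready"
-- ===== Notes on version B (the rewrite author's own statement) =====
-- stated objective: simpler
-- what changed: Replaces building a char list and summing two slices with a single enumerate pass maintaining one signed balance (add digits before the midpoint, subtract after) and testing it against zero.
import Mathlib
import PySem

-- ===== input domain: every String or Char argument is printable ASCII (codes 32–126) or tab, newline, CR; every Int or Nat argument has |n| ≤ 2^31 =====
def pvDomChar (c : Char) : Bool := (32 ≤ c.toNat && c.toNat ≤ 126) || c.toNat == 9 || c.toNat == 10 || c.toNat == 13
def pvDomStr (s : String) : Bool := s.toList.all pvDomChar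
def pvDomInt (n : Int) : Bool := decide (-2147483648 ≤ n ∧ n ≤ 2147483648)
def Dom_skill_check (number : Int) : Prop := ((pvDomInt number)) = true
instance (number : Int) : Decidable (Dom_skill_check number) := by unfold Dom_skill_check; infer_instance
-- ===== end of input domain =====

-- B replaces A's char-list build plus two slice sums by one enumerate pass over the digits
-- keeping a single signed balance; objective: simpler. (Return-value equivalence; neither mutates.)

-- int(ch) for a single character (shared by both ports; none = ValueError, outside Pre_)
def pvInt1 (c : Char) : Int := (PySem.Int.ofStr? (String.ofList [c])).getD 0

-- ===== PORT A =====
def skill_check (number : Int) : String :=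
  let point : List Char := (PySem.Int.toChars number).foldl (fun acc i => acc ++ [i]) []
  let mid : Int := PySem.Int.floordiv (point.length : Int) 2
  let left_sum : Int := (PySem.List.slice point none (some mid)).foldl (fun s i => s + pvInt1 i) 0
  let right_sum : Int := (PySem.List.slice point (some mid) none).foldl (fun s i => s + pvInt1 i) 0
  if left_sum == right_sum then "lucky" else "ready"

-- ===== PORT B =====
def skill_check_alt (number : Int) : String :=
  let s : List Char := PySem.Int.toChars number
  let mid : Int := PySem.Int.floordiv (s.length : Int) 2
  let bal : Int := (PySem.List.enumerate s).foldl
    (fun bal p => let d := pvInt1 p.2; if p.1 < mid then bal + d else bal - d) 0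
  if bal == 0 then "lucky" else "ready"

-- ===== PRECONDITION & SPEC =====
-- Pre_ excludes exactly the negative numbers: there str(number) starts with '-' and int('-') raises ValueError in A (and in B).
def Pre_skill_check (number : Int) : Prop := 0 ≤ number
instance (number : Int) : Decidable (Pre_skill_check number) := by unfold Pre_skill_check; infer_instance
def pvWitness_skill_check : Int := (123321)
def Spec_skill_check (number : Int) (out : String) : Prop := out = skill_check_alt number
instance (number : Int) (out : String) : Decidable (Spec_skill_check number out) := by unfold Spec_skill_check; infer_instance

-- ===== CLAIM (what is proved, stated in full; the proofs are below) =====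
def Claim_equal_skill_check : Prop := ∀ (number : Int), Dom_skill_check number → Pre_skill_check number → Spec_skill_check number (skill_check number)

-- ===== LEMMAS AND PROOFS =====

theorem pv_foldl_append_id (cs acc : List Char) :
    cs.foldl (fun acc i => acc ++ [i]) acc = acc ++ cs := by
  induction cs generalizing acc with
  | nil => simp
  | cons c t ih => simp [List.foldl, ih]

theorem pv_foldl_sum (cs : List Char) (b : Int) :
    cs.foldl (fun s i => s + pvInt1 i) b = b + (cs.map pvInt1).sum := by
  induction cs generalizing b with
  | nil => simp
  | cons c t ih => simp [List.foldl, ih]; ring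

theorem pv_bal (cs : List Char) (m s b : Int) :
    ((PySem.List.enumerate cs s).foldl
      (fun bal p => if p.1 < m then bal + pvInt1 p.2 else bal - pvInt1 p.2) b)
    = b + ((cs.take (m - s).toNat).map pvInt1).sum - ((cs.drop (m - s).toNat).map pvInt1).sum := by
  induction cs generalizing s b with
  | nil => simp [PySem.List.enumerate_nil]
  | cons c t ih =>
    rw [PySem.List.enumerate_cons]
    simp only [List.foldl]
    by_cases h : s < m
    · rw [if_pos h, ih]
      have h1 : (m - s).toNat = (m - (s + 1)).toNat + 1 := by omega
      rw [h1, List.take_succ_cons, List.drop_succ_cons]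
      simp; ring
    · rw [if_neg h, ih]
      have h1 : (m - s).toNat = 0 := by omega
      have h2 : (m - (s + 1)).toNat = 0 := by omega
      rw [h1, h2]
      simp; ring

theorem skill_check_eq (number : Int) :
    skill_check number = skill_check_alt number := by
  unfold skill_check skill_check_alt
  rw [pv_foldl_append_id]
  simp only [List.nil_append]
  set cs := PySem.Int.toChars number with hcs
  have hm : PySem.Int.floordiv (cs.length : Int) 2 = ((cs.length / 2 : Nat) : Int) :=
    PySem.Int.floordiv_natCast cs.length 2
  have hb := pv_bal cs ((cs.length / 2 : Nat) : Int) 0 0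
  simp only [sub_zero, Int.toNat_natCast] at hb
  simp only [hm, PySem.List.slice_to_natCast, PySem.List.slice_from_natCast, pv_foldl_sum,
    zero_add, hb]
  by_cases h : ((cs.map pvInt1).take (cs.length / 2)).sum = ((cs.map pvInt1).drop (cs.length / 2)).sum
  · simp [h]
  · have h2 : ((cs.map pvInt1).take (cs.length / 2)).sum - ((cs.map pvInt1).drop (cs.length / 2)).sum ≠ 0 := by
      omega
    simp [h, h2]

-- ===== VERDICT (by name: the statement is the Claim_ definition above) =====
theorem skill_check_spec : Claim_equal_skill_check := by
  intro number _ _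
  unfold Spec_skill_check
  exact skill_check_eq number
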